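-- pv_equiv track=rewrite | github.com/BcKmini/Python_Algorithm | 백준/Gold/2504. 괄호의 값/괄호의 값.py | calc_parentheses_value
-- ===== SOURCE A (Python) =====
-- def calc_parentheses_value(s):
--     stack = []
--     result = 0
--     temp = 1
--
--     for i in range(len(s)):
--         if s[i] == '(':
--             stack.append('(')
--             temp *= 2
--         elif s[i] == '[':
--             stack.append('[')
--             temp *= 3
--         elif s[i] == ')':
--             if not stack or stack[-1] != '(':
--                 return 0
--             if s[i-1] == '(':
--                 result += temp
--             stack.pop()
--             temp //= 2
--         elif s[i] == ']':
--             if not stack or stack[-1] != '[':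
--                 return 0
--             if s[i-1] == '[':
--                 result += temp
--             stack.pop()
--             temp //= 3
--
--     if stack:
--         return 0
--     return result
-- ===== SOURCE B (Python) =====
-- def calc_parentheses_value(s):
--     # Stack holds computed sub-values (ints) and open-bracket markers (chars);
--     # a non-bracket character is an atom of value 0.
--     st = []
--     for ch in s:
--         if ch == '(' or ch == '[':
--             st.append(ch)
--         elif ch == ')' or ch == ']':
--             opener = '(' if ch == ')' else '['
--             base = 2 if ch == ')' else 3
--             total = 0
--             count = 0
--             while st and isinstance(st[-1], int):
--                 total += st.pop()
--                 count += 1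
--             if not st or st[-1] != opener:
--                 return 0
--             st.pop()
--             st.append(base if count == 0 else base * total)
--         else:
--             st.append(0)
--     answer = 0
--     for x in st:
--         if not isinstance(x, int):
--             return 0
--         answer += x
--     return answer
-- ===== Notes on version B (the rewrite author's own statement) =====
-- stated objective: alternative
-- what changed: Replaces A's global running multiplier (temp) + accumulator (result) with a stack of computed sub-values: each closing bracket pops and sums the values on top and pushes the reduced pair value (non-bracket characters become 0-valued atoms), the final answer being the sum of the values left on the stack.
import Mathlib
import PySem

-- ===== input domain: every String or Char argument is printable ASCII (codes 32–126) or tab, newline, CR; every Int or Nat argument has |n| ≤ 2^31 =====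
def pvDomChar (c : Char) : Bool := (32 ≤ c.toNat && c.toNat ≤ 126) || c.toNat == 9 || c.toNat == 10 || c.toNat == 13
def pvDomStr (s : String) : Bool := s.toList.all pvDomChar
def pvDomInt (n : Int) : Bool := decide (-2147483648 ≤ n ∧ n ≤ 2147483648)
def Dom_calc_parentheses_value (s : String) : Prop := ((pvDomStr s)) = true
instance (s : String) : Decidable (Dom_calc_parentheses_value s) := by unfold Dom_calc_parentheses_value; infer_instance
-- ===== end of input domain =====

-- B replaces A's global multiplier/accumulator bookkeeping with a value stack that
-- reduces each closed pair to its computed sub-value (objective: alternative algorithm).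

-- ===== PORT A =====
-- index loop with early returns, ported as recursion on the index
def goA (cs : List Char) (i : Nat) (stack : List Char) (res temp : Int) : Int :=
  if h : i < cs.length then
    if cs[i] = '(' then goA cs (i+1) ('(' :: stack) res (temp * 2)
    else if cs[i] = '[' then goA cs (i+1) ('[' :: stack) res (temp * 3)
    else if cs[i] = ')' then
      match stack with
      | [] => (0 : Int)
      | t :: rest =>
        if t ≠ '(' then (0 : Int)
        else goA cs (i+1) rest
          (if PySem.List.pyGet? cs ((i : Int) - 1) = some '(' then res + temp else res)
          (PySem.Int.floordiv temp 2)
    else if cs[i] = ']' then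
      match stack with
      | [] => (0 : Int)
      | t :: rest =>
        if t ≠ '[' then (0 : Int)
        else goA cs (i+1) rest
          (if PySem.List.pyGet? cs ((i : Int) - 1) = some '[' then res + temp else res)
          (PySem.Int.floordiv temp 3)
    else goA cs (i+1) stack res temp
  else if stack = [] then res else 0
termination_by cs.length - i
decreasing_by all_goals omega

def calc_parentheses_value (s : String) : Int := goA s.toList 0 [] 0 1

-- ===== PORT B =====
-- stack entries: Sum.inl = an open-bracket marker, Sum.inr = a computed int value
-- the while loop popping int values off the top: returns (total, count, rest)
def popInts : List (Char ⊕ Int) → Int × Nat × List (Char ⊕ Int)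
  | Sum.inr v :: rest =>
    let p := popInts rest
    (p.1 + v, p.2.1 + 1, p.2.2)
  | st => (0, 0, st)

-- the final loop over the stack bottom-to-top: 0 at the first marker, else running sum
def sumStack : List (Char ⊕ Int) → Int → Int
  | [], acc => acc
  | Sum.inl _ :: _, _ => 0
  | Sum.inr v :: r, acc => sumStack r (acc + v)

def goB (cs : List Char) (st : List (Char ⊕ Int)) : Int :=
  match cs with
  | [] => sumStack st.reverse 0
  | ch :: rest =>
    if ch = '(' ∨ ch = '[' then goB rest (Sum.inl ch :: st)
    else if ch = ')' ∨ ch = ']' then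
      match popInts st with
      | (total, count, Sum.inl t :: st') =>
        if t = (if ch = ')' then '(' else '[') then
          goB rest (Sum.inr (if count = 0 then (if ch = ')' then (2:Int) else 3)
                             else (if ch = ')' then (2:Int) else 3) * total) :: st')
        else 0
      | _ => 0
    else goB rest (Sum.inr 0 :: st)

def calc_parentheses_value_alt (s : String) : Int := goB s.toList []

-- ===== PRECONDITION & SPEC =====
def Spec_calc_parentheses_value (s : String) (out : Int) : Prop := out = calc_parentheses_value_alt s
instance (s : String) (out : Int) : Decidable (Spec_calc_parentheses_value s out) := by unfold Spec_calc_parentheses_value; infer_instance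

-- ===== CLAIM (what is proved, stated in full; the proofs are below) =====
def Claim_equal_calc_parentheses_value : Prop := ∀ (s : String), Dom_calc_parentheses_value s → Spec_calc_parentheses_value s (calc_parentheses_value s)

-- ===== LEMMAS AND PROOFS =====

-- weight of an open bracket, and of a stack of open brackets (A's `temp`)
def wChar (c : Char) : Int := if c = '(' then 2 else 3
def wprod : List Char → Int
  | [] => 1
  | c :: r => wChar c * wprod r

-- the open-bracket markers of a B-stack (top first) = A's stack
def markers : List (Char ⊕ Int) → List Char
  | [] => []
  | Sum.inl c :: r => c :: markers r
  | Sum.inr _ :: r => markers r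

-- each value on the B-stack weighted by the product of the markers below it (A's `res`)
def vsum : List (Char ⊕ Int) → Int
  | [] => 0
  | Sum.inl _ :: r => vsum r
  | Sum.inr v :: r => v * wprod (markers r) + vsum r

-- plain sum of the values on the stack
def rsum : List (Char ⊕ Int) → Int
  | [] => 0
  | Sum.inl _ :: r => rsum r
  | Sum.inr v :: r => v + rsum r

lemma markers_append (a b : List (Char ⊕ Int)) :
    markers (a ++ b) = markers a ++ markers b := by
  induction a with
  | nil => simp [markers]
  | cons x r ih => cases x <;> simp [markers, ih]

lemma markers_reverse (l : List (Char ⊕ Int)) :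
    markers l.reverse = (markers l).reverse := by
  induction l with
  | nil => simp [markers]
  | cons x r ih => cases x <;> simp [markers, markers_append, ih]

lemma rsum_append (a b : List (Char ⊕ Int)) :
    rsum (a ++ b) = rsum a + rsum b := by
  induction a with
  | nil => simp [rsum]
  | cons x r ih => cases x <;> simp [rsum, ih] <;> ring

lemma rsum_reverse (l : List (Char ⊕ Int)) :
    rsum l.reverse = rsum l := by
  induction l with
  | nil => rfl
  | cons x r ih => cases x <;> simp [rsum, rsum_append, ih] <;> ring

lemma sumStack_eq (l : List (Char ⊕ Int)) (acc : Int) :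
    sumStack l acc = if markers l = [] then acc + rsum l else 0 := by
  induction l generalizing acc with
  | nil => simp [sumStack, markers, rsum]
  | cons x r ih =>
    cases x with
    | inl c => simp [sumStack, markers]
    | inr v => rw [sumStack, ih]; simp [markers, rsum]; ring_nf

lemma vsum_no_markers (l : List (Char ⊕ Int)) (h : markers l = []) : vsum l = rsum l := by
  induction l with
  | nil => rfl
  | cons x r ih =>
    cases x with
    | inl c => simp [markers] at h
    | inr v => simp [markers] at h; simp [vsum, rsum, markers, h, wprod, ih h]

lemma popInts_markers (st : List (Char ⊕ Int)) :
    markers (popInts st).2.2 = markers st := by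
  induction st with
  | nil => rfl
  | cons x r ih => cases x <;> simp [popInts, markers, ih]

lemma popInts_vsum (st : List (Char ⊕ Int)) :
    vsum st = (popInts st).1 * wprod (markers (popInts st).2.2) + vsum (popInts st).2.2 := by
  induction st with
  | nil => simp [popInts, vsum]
  | cons x r ih =>
    cases x with
    | inl c => simp [popInts, vsum]
    | inr v => simp [popInts, vsum, popInts_markers]; rw [ih]; simp [popInts_markers]; ring

lemma popInts_shape (st : List (Char ⊕ Int)) :
    (popInts st).2.2 = [] ∨ ∃ c r, (popInts st).2.2 = Sum.inl c :: r := by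
  induction st with
  | nil => left; rfl
  | cons x r ih =>
    cases x with
    | inl c => right; exact ⟨c, r, rfl⟩
    | inr v => simpa [popInts] using ih

lemma popInts_count_zero (st : List (Char ⊕ Int)) (h : (popInts st).2.1 = 0) :
    (popInts st).2.2 = st := by
  cases st with
  | nil => rfl
  | cons x r => cases x with
    | inl c => rfl
    | inr v => simp [popInts] at h

lemma popInts_count_pos (st : List (Char ⊕ Int)) (h : (popInts st).2.1 ≠ 0) :
    ∃ v r, st = Sum.inr v :: r := by
  cases st with
  | nil => simp [popInts] at h
  | cons x r => cases x with
    | inl c => simp [popInts] at h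
    | inr v => exact ⟨v, r, rfl⟩

lemma floordiv_two_mul (w : Int) : PySem.Int.floordiv (2 * w) 2 = w := by
  rw [PySem.Int.floordiv_eq_ediv_of_pos (by norm_num)]
  exact Int.mul_ediv_cancel_left w (by norm_num)

lemma floordiv_three_mul (w : Int) : PySem.Int.floordiv (3 * w) 3 = w := by
  rw [PySem.Int.floordiv_eq_ediv_of_pos (by norm_num)]
  exact Int.mul_ediv_cancel_left w (by norm_num)

lemma pyGet?_at_i (cs : List Char) (i : Nat) (h : i < cs.length) :
    PySem.List.pyGet? cs ((((i+1) : Nat) : Int) - 1) = some cs[i] := by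
  have : ((((i+1) : Nat) : Int) - 1) = ((i : Nat) : Int) := by push_cast; ring
  rw [this, PySem.List.pyGet?_natCast]
  simp [List.getElem?_eq_getElem h]

lemma main (cs : List Char) (i : Nat) (st : List (Char ⊕ Int))
    (hle : i ≤ cs.length)
    (hinl : ∀ c r, st = Sum.inl c :: r → PySem.List.pyGet? cs ((i : Int) - 1) = some c)
    (hinr : ∀ v r, st = Sum.inr v :: r →
      ∀ c', PySem.List.pyGet? cs ((i : Int) - 1) = some c' → c' ≠ '(' ∧ c' ≠ '[') :
    goA cs i (markers st) (vsum st) (wprod (markers st)) = goB (cs.drop i) st := by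
  by_cases h : i < cs.length
  · rw [goA.eq_def, List.drop_eq_getElem_cons h]
    simp only [dif_pos h, goB]
    by_cases h1 : cs[i] = '('
    · -- open paren
      have hrec := main cs (i+1) (Sum.inl '(' :: st) (by omega)
        (by intro c r hcr; cases hcr; rw [← h1]; exact pyGet?_at_i cs i h)
        (by intro v r hvr; cases hvr)
      simp only [markers, vsum] at hrec
      have hw : wprod ('(' :: markers st) = wprod (markers st) * 2 := by
        simp [wprod, wChar]; ring
      rw [hw] at hrec
      simp only [h1]
      simpa using hrec
    · by_cases h2 : cs[i] = '['
      · have hrec := main cs (i+1) (Sum.inl '[' :: st) (by omega)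
          (by intro c r hcr; cases hcr; rw [← h2]; exact pyGet?_at_i cs i h)
          (by intro v r hvr; cases hvr)
        simp only [markers, vsum] at hrec
        have hw : wprod ('[' :: markers st) = wprod (markers st) * 3 := by
          simp [wprod, wChar]; ring
        rw [hw] at hrec
        simp only [h2]
        simpa using hrec
      · by_cases h3 : cs[i] = ')'
        · -- close paren
          simp only [h3]
          rcases popInts_shape st with hsh | ⟨c, st'', hsh⟩
          · -- after popping values the stack is empty → both return 0
            have hm : markers st = [] := by rw [← popInts_markers, hsh]; rfl
            have htup : popInts st = ((popInts st).1, (popInts st).2.1, ([] : List (Char ⊕ Int))) := by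
              rw [← hsh]
            rw [hm, htup]
            simp
          · have hm : markers st = c :: markers st'' := by
              rw [← popInts_markers, hsh, markers]
            have htup : popInts st = ((popInts st).1, (popInts st).2.1, Sum.inl c :: st'') := by
              rw [← hsh]
            rw [hm, htup]
            by_cases hc : c = '('
            · subst hc
              by_cases hcnt : (popInts st).2.1 = 0
              · -- empty pair: the previous character is the matching '('
                have hst : st = Sum.inl '(' :: st'' := by
                  rw [← popInts_count_zero st hcnt, hsh]
                have hprev := hinl '(' st'' hst
                have hv : vsum st = vsum st'' := by rw [hst, vsum]
                have hrec := main cs (i+1) (Sum.inr 2 :: st'') (by omega)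
                  (by intro c r hcr; cases hcr)
                  (by intro v r hvr c' hc'
                      rw [pyGet?_at_i cs i h, h3] at hc'
                      cases hc'; decide)
                simp only [markers, vsum] at hrec
                have hw : wprod ('(' :: markers st'') = 2 * wprod (markers st'') := by
                  simp [wprod, wChar]
                rw [show (2:Int) * wprod (markers st'') + vsum st'' = vsum st'' + 2 * wprod (markers st'') from by ring] at hrec
                simp only [hw, floordiv_two_mul, hprev, hv, hcnt]
                simpa using hrec
              · -- nonempty pair: the previous character cannot be an open bracket
                obtain ⟨v0, tl, hst⟩ := popInts_count_pos st hcnt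
                have hnoadd : ¬ (PySem.List.pyGet? cs ((i : Int) - 1) = some '(') := by
                  intro hp; exact (hinr v0 tl hst '(' hp).1 rfl
                have hv : vsum st = 2 * (popInts st).1 * wprod (markers st'') + vsum st'' := by
                  rw [popInts_vsum st, hsh, markers]
                  simp [vsum, wprod, wChar]; ring
                have hrec := main cs (i+1) (Sum.inr (2 * (popInts st).1) :: st'') (by omega)
                  (by intro c r hcr; cases hcr)
                  (by intro v r hvr c' hc'
                      rw [pyGet?_at_i cs i h, h3] at hc'
                      cases hc'; decide)
                simp only [markers, vsum] at hrec
                have hw : wprod ('(' :: markers st'') = 2 * wprod (markers st'') := by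
                  simp [wprod, wChar]
                simp only [hw, floordiv_two_mul, hv, if_neg hnoadd, if_neg hcnt]
                simpa using hrec
            · -- mismatched bracket on top: both return 0
              simp [hc]
        · by_cases h4 : cs[i] = ']'
          · simp only [h4]
            rcases popInts_shape st with hsh | ⟨c, st'', hsh⟩
            · have hm : markers st = [] := by rw [← popInts_markers, hsh]; rfl
              have htup : popInts st = ((popInts st).1, (popInts st).2.1, ([] : List (Char ⊕ Int))) := by
                rw [← hsh]
              rw [hm, htup]
              simp
            · have hm : markers st = c :: markers st'' := by
                rw [← popInts_markers, hsh, markers]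
              have htup : popInts st = ((popInts st).1, (popInts st).2.1, Sum.inl c :: st'') := by
                rw [← hsh]
              rw [hm, htup]
              by_cases hc : c = '['
              · subst hc
                by_cases hcnt : (popInts st).2.1 = 0
                · have hst : st = Sum.inl '[' :: st'' := by
                    rw [← popInts_count_zero st hcnt, hsh]
                  have hprev := hinl '[' st'' hst
                  have hv : vsum st = vsum st'' := by rw [hst, vsum]
                  have hrec := main cs (i+1) (Sum.inr 3 :: st'') (by omega)
                    (by intro c r hcr; cases hcr)
                    (by intro v r hvr c' hc'
                        rw [pyGet?_at_i cs i h, h4] at hc'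
                        cases hc'; decide)
                  simp only [markers, vsum] at hrec
                  have hw : wprod ('[' :: markers st'') = 3 * wprod (markers st'') := by
                    simp [wprod, wChar]
                  rw [show (3:Int) * wprod (markers st'') + vsum st'' = vsum st'' + 3 * wprod (markers st'') from by ring] at hrec
                  simp only [hw, floordiv_three_mul, hprev, hv, hcnt]
                  simpa using hrec
                · obtain ⟨v0, tl, hst⟩ := popInts_count_pos st hcnt
                  have hnoadd : ¬ (PySem.List.pyGet? cs ((i : Int) - 1) = some '[') := by
                    intro hp; exact (hinr v0 tl hst '[' hp).2 rfl
                  have hv : vsum st = 3 * (popInts st).1 * wprod (markers st'') + vsum st'' := by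
                    rw [popInts_vsum st, hsh, markers]
                    simp [vsum, wprod, wChar]; ring
                  have hrec := main cs (i+1) (Sum.inr (3 * (popInts st).1) :: st'') (by omega)
                    (by intro c r hcr; cases hcr)
                    (by intro v r hvr c' hc'
                        rw [pyGet?_at_i cs i h, h4] at hc'
                        cases hc'; decide)
                  simp only [markers, vsum] at hrec
                  have hw : wprod ('[' :: markers st'') = 3 * wprod (markers st'') := by
                    simp [wprod, wChar]
                  simp only [hw, floordiv_three_mul, hv, if_neg hnoadd, if_neg hcnt]
                  simpa using hrec
              · simp [hc]
          · -- any other character: A skips it, B pushes a 0 atom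
            have hrec := main cs (i+1) (Sum.inr 0 :: st) (by omega)
              (by intro c r hcr; cases hcr)
              (by intro v r hvr c' hc'
                  rw [pyGet?_at_i cs i h] at hc'
                  cases hc'; exact ⟨h1, h2⟩)
            simp only [markers, vsum] at hrec
            simp only [if_neg h1, if_neg h2, if_neg h3, if_neg h4,
              if_neg (by simp [h1, h2] : ¬ (cs[i] = '(' ∨ cs[i] = '[')),
              if_neg (by simp [h3, h4] : ¬ (cs[i] = ')' ∨ cs[i] = ']'))]
            simpa using hrec
  · -- end of the string
    rw [goA.eq_def]
    simp only [dif_neg h]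
    rw [List.drop_of_length_le (by omega), goB, sumStack_eq, markers_reverse, rsum_reverse]
    by_cases hm : markers st = []
    · rw [if_pos hm, if_pos (by simp [hm]), vsum_no_markers st hm]; ring
    · rw [if_neg hm, if_neg (by simp [hm])]
termination_by cs.length - i
decreasing_by all_goals omega

-- ===== VERDICT (by name: the statement is the Claim_ definition above) =====
theorem calc_parentheses_value_spec : Claim_equal_calc_parentheses_value := by
  intro s _
  unfold Spec_calc_parentheses_value calc_parentheses_value calc_parentheses_value_alt
  have := main s.toList 0 [] (by omega)
    (by intro c r hcr; cases hcr) (by intro v r hvr; cases hvr)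
  simpa [markers, vsum, wprod] using this
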